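-- pv_equiv track=rewrite | github.com/kladnasoft/supertable | supertable/engine/spark_thrift.py | _double_quotes_to_backticks
-- ===== SOURCE A (Python) =====
-- def _double_quotes_to_backticks(sql: str) -> str:
--     """Replace double-quoted identifiers with backtick-quoted identifiers.
--
--     Walks the SQL character-by-character, respecting single-quoted string
--     literals (which must not be modified).  Only double-quoted sequences
--     are converted.
--
--     Example:
--         ``SELECT "product_id", SUM("revenue") AS "total"``
--         → ``SELECT `product_id`, SUM(`revenue`) AS `total```
--     """
--     result = []
--     i = 0
--     in_single = False
--     while i < len(sql):
--         ch = sql[i]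
--         if ch == "'" and not in_single:
--             # Enter single-quoted string — copy verbatim until closing '
--             in_single = True
--             result.append(ch)
--             i += 1
--             while i < len(sql):
--                 c2 = sql[i]
--                 result.append(c2)
--                 if c2 == "'" and (i + 1 >= len(sql) or sql[i + 1] != "'"):
--                     in_single = False
--                     i += 1
--                     break
--                 if c2 == "'" and i + 1 < len(sql) and sql[i + 1] == "'":
--                     # Escaped single quote — copy both
--                     result.append(sql[i + 1])
--                     i += 2
--                 else:
--                     i += 1
--         elif ch == '"':
--             # Double-quoted identifier — convert to backtick
--             result.append('`')
--             i += 1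
--             while i < len(sql) and sql[i] != '"':
--                 result.append(sql[i])
--                 i += 1
--             result.append('`')
--             if i < len(sql):
--                 i += 1  # skip closing "
--         else:
--             result.append(ch)
--             i += 1
--     return ''.join(result)
-- ===== SOURCE B (Python) =====
-- # B: single-pass 4-state DFA (pure step function + fold) instead of A's nested index loops with lookahead.
-- _NORMAL, _SINGLE, _SINGLE_Q, _DOUBLE = 0, 1, 2, 3
--
--
-- def _step(state, ch):
--     """One DFA transition: returns (emitted char, next state)."""
--     if state == _SINGLE:
--         return ch, (_SINGLE_Q if ch == "'" else _SINGLE)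
--     if state == _SINGLE_Q and ch == "'":
--         return ch, _SINGLE  # escaped '' inside a literal
--     if state == _DOUBLE:
--         return ('`', _NORMAL) if ch == '"' else (ch, _DOUBLE)
--     # state is _NORMAL, or _SINGLE_Q whose literal just closed
--     if ch == "'":
--         return ch, _SINGLE
--     if ch == '"':
--         return '`', _DOUBLE
--     return ch, _NORMAL
--
--
-- def _double_quotes_to_backticks(sql: str) -> str:
--     state = _NORMAL
--     out = []
--     for ch in sql:
--         emit, state = _step(state, ch)
--         out.append(emit)
--     if state == _DOUBLE:
--         out.append('`')  # unterminated identifier still gets closed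
--     return ''.join(out)
-- ===== Notes on version B (the rewrite author's own statement) =====
-- stated objective: simpler
-- what changed: A's nested while-loops with index arithmetic and one-character lookahead are replaced by a single flat pass folding a pure 4-state DFA step function (NORMAL/SINGLE/SINGLE_Q/DOUBLE) over the characters; the escaped-quote lookahead becomes the SINGLE_Q state.
import Mathlib
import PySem

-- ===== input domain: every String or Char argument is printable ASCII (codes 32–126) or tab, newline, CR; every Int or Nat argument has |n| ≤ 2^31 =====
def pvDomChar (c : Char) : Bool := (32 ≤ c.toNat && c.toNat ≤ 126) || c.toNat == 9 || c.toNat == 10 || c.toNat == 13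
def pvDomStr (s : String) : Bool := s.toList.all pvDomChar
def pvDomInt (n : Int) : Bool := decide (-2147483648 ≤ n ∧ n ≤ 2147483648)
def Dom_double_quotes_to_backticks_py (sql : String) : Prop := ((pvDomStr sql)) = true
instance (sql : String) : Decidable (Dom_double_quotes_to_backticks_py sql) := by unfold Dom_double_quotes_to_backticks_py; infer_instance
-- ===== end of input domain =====

-- B replaces A's nested index loops with lookahead by a single-pass 4-state DFA
-- (pure step function folded over the characters); same return value, simpler control flow.

-- ===== PORT A =====
-- A's outer while loop / single-quote inner loop / double-quote inner loop,
-- as three mutually recursive functions over the remaining characters.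
mutual
  -- outer loop (in_single is False whenever control is here)
  def pvScanA : List Char → List Char
    | [] => []
    | c :: rest =>
      if c = '\'' then c :: pvScanSingle rest
      else if c = '"' then '`' :: pvScanDouble rest
      else c :: pvScanA rest
  -- inner while: copy a single-quoted literal verbatim ('' kept as escape)
  def pvScanSingle : List Char → List Char
    | [] => []
    | c :: rest =>
      if c = '\'' then
        match rest with
        | [] => [c]                                   -- i+1 >= len: break
        | c2 :: rest2 =>
          if c2 = '\'' then c :: c2 :: pvScanSingle rest2   -- escaped quote, copy both
          else c :: pvScanA (c2 :: rest2)                    -- closing quote: break to outer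
      else c :: pvScanSingle rest
  -- inner while: copy until closing ", emit backticks
  def pvScanDouble : List Char → List Char
    | [] => ['`']
    | c :: rest =>
      if c = '"' then '`' :: pvScanA rest
      else c :: pvScanDouble rest
end

def double_quotes_to_backticks_py (sql : String) : String :=
  String.ofList (pvScanA sql.toList)

-- ===== PORT B =====
-- states: 0 = _NORMAL, 1 = _SINGLE, 2 = _SINGLE_Q, 3 = _DOUBLE
def pvStepB (state : Nat) (ch : Char) : Char × Nat :=
  if state = 1 then (ch, if ch = '\'' then 2 else 1)
  else if state = 2 ∧ ch = '\'' then (ch, 1)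
  else if state = 3 then (if ch = '"' then ('`', 0) else (ch, 3))
  else if ch = '\'' then (ch, 1)
  else if ch = '"' then ('`', 3)
  else (ch, 0)

def double_quotes_to_backticks_py_alt (sql : String) : String :=
  let r := sql.toList.foldl
    (fun (acc : List Char × Nat) ch =>
      (acc.1 ++ [(pvStepB acc.2 ch).1], (pvStepB acc.2 ch).2))
    ([], 0)
  String.ofList (if r.2 = 3 then r.1 ++ ['`'] else r.1)

-- ===== PRECONDITION & SPEC =====
def Spec_double_quotes_to_backticks_py (sql : String) (out : String) : Prop := out = double_quotes_to_backticks_py_alt sql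
instance (sql : String) (out : String) : Decidable (Spec_double_quotes_to_backticks_py sql out) := by unfold Spec_double_quotes_to_backticks_py; infer_instance

-- ===== CLAIM (what is proved, stated in full; the proofs are below) =====
def Claim_equal_double_quotes_to_backticks_py : Prop := ∀ (sql : String), Dom_double_quotes_to_backticks_py sql → Spec_double_quotes_to_backticks_py sql (double_quotes_to_backticks_py sql)

-- ===== LEMMAS AND PROOFS =====

-- B's fold from state s, with the closing backtick of an unterminated identifier appended
def pvRunB (s : Nat) (l : List Char) : List Char :=
  let r := l.foldl
    (fun (acc : List Char × Nat) ch =>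
      (acc.1 ++ [(pvStepB acc.2 ch).1], (pvStepB acc.2 ch).2))
    ([], s)
  if r.2 = 3 then r.1 ++ ['`'] else r.1

theorem pvFoldB_acc (l : List Char) (a : List Char) (s : Nat) :
    l.foldl (fun (acc : List Char × Nat) ch =>
        (acc.1 ++ [(pvStepB acc.2 ch).1], (pvStepB acc.2 ch).2)) (a, s)
    = (a ++ (l.foldl (fun (acc : List Char × Nat) ch =>
        (acc.1 ++ [(pvStepB acc.2 ch).1], (pvStepB acc.2 ch).2)) ([], s)).1,
       (l.foldl (fun (acc : List Char × Nat) ch =>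
        (acc.1 ++ [(pvStepB acc.2 ch).1], (pvStepB acc.2 ch).2)) ([], s)).2) := by
  induction l generalizing a s with
  | nil => simp
  | cons c t ih =>
    simp only [List.foldl_cons, List.nil_append]
    rw [ih, ih [(pvStepB s c).1]]
    simp

theorem pvRunB_nil (s : Nat) : pvRunB s [] = if s = 3 then ['`'] else [] := by
  simp [pvRunB]

theorem pvRunB_cons (s : Nat) (c : Char) (l : List Char) :
    pvRunB s (c :: l) = (pvStepB s c).1 :: pvRunB (pvStepB s c).2 l := by
  simp only [pvRunB, List.foldl_cons, List.nil_append]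
  rw [pvFoldB_acc]
  by_cases h : (l.foldl (fun (acc : List Char × Nat) ch =>
      (acc.1 ++ [(pvStepB acc.2 ch).1], (pvStepB acc.2 ch).2)) ([], (pvStepB s c).2)).2 = 3 <;> simp [h]

-- the main invariant: B's DFA run agrees with A's three scanners
theorem pvRun_eq (n : Nat) : ∀ l : List Char, l.length ≤ n →
    pvRunB 0 l = pvScanA l ∧ pvRunB 1 l = pvScanSingle l ∧ pvRunB 3 l = pvScanDouble l := by
  induction n with
  | zero =>
    intro l hl
    have : l = [] := List.eq_nil_of_length_eq_zero (Nat.le_zero.mp hl)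
    subst this
    refine ⟨?_, ?_, ?_⟩ <;> simp [pvRunB_nil, pvScanA, pvScanSingle, pvScanDouble]
  | succ n ih =>
    intro l hl
    match l with
    | [] =>
      refine ⟨?_, ?_, ?_⟩ <;> simp [pvRunB_nil, pvScanA, pvScanSingle, pvScanDouble]
    | c :: rest =>
      have hr : rest.length ≤ n := by simpa using Nat.lt_succ_iff.mp (by simpa using hl)
      obtain ⟨ihA, ihS, ihD⟩ := ih rest hr
      refine ⟨?_, ?_, ?_⟩
      · -- state 0 vs pvScanA
        rw [pvRunB_cons]
        by_cases h1 : c = '\''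
        · simp [pvStepB, h1, pvScanA, ihS]
        · by_cases h2 : c = '"'
          · simp [pvStepB, h2, pvScanA, ihD]
          · simp [pvStepB, h1, h2, pvScanA, ihA]
      · -- state 1 vs pvScanSingle
        rw [pvRunB_cons]
        by_cases h1 : c = '\''
        · -- emitted c, now in state 2
          simp only [pvStepB, h1, if_true]
          match rest, hr with
          | [], _ => simp [pvRunB_nil, pvScanSingle]
          | c2 :: rest2, hr2 =>
            rw [pvRunB_cons]
            by_cases h3 : c2 = '\''
            · have hr2' : rest2.length ≤ n := by
                simp at hr2; omega
              obtain ⟨_, ihS2, _⟩ := ih rest2 hr2'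
              simp [pvStepB, h3, pvScanSingle, ihS2]
            · -- literal closed; c2 handled as in state 0
              obtain ⟨ihA2, _, _⟩ := ih (c2 :: rest2) hr2
              rw [pvRunB_cons] at ihA2
              simp only [pvScanSingle]
              by_cases h4 : c2 = '"' <;>
                simp_all [pvStepB]
        · rw [pvScanSingle.eq_def]
          simp [pvStepB, h1, ihS]
      · -- state 3 vs pvScanDouble
        rw [pvRunB_cons]
        by_cases h2 : c = '"'
        · simp [pvStepB, h2, pvScanDouble, ihA]
        · simp [pvStepB, h2, pvScanDouble, ihD]

-- ===== VERDICT (by name: the statement is the Claim_ definition above) =====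
theorem double_quotes_to_backticks_py_spec : Claim_equal_double_quotes_to_backticks_py := by
  intro sql _
  unfold Spec_double_quotes_to_backticks_py
  unfold double_quotes_to_backticks_py double_quotes_to_backticks_py_alt
  have h := (pvRun_eq sql.toList.length sql.toList (le_refl _)).1
  simp only [pvRunB] at h
  rw [← h]
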